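-- pv_equiv track=rewrite | github.com/mohammadfaiizan/ProjectI | DSA/Problem/Graph/07_Topological_Sort_DAG/1059_All_Paths_from_Source_Lead_to_Destination.py | leadsToDestination_memoized_dfs
-- ===== SOURCE A (Python) =====
-- from typing import List, Set
-- from collections import defaultdict
--
-- def leadsToDestination_memoized_dfs(n: int, edges: List[List[int]], source: int, destination: int) -> bool:
--     """
--     Approach 3: DFS with Memoization
--
--     Use memoization to avoid recomputing results for visited nodes.
--
--     Time: O(V + E), Space: O(V)
--     """
--     # Build graph
--     graph = defaultdict(list)
--     for u, v in edges:
--         graph[u].append(v)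
--
--     # Destination cannot have outgoing edges
--     if graph[destination]:
--         return False
--
--     # Memoization
--     memo = {}
--     visiting = set()
--
--     def dfs(node: int) -> bool:
--         if node in memo:
--             return memo[node]
--
--         if node in visiting:  # Cycle detected
--             return False
--
--         # Leaf node must be destination
--         if not graph[node]:
--             memo[node] = (node == destination)
--             return memo[node]
--
--         visiting.add(node)
--
--         # Check all paths from this node
--         result = True
--         for neighbor in graph[node]:
--             if not dfs(neighbor):
--                 result = False
--                 break
--
--         visiting.remove(node)
--         memo[node] = result
--         return result
--
--     return dfs(source)
-- ===== SOURCE B (Python) =====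
-- def leadsToDestination_memoized_dfs(n, edges, source, destination):
--     """Iterative three-color DFS with an explicit stack (no recursion)."""
--     graph = {}
--     for u, v in edges:
--         graph.setdefault(u, []).append(v)
--
--     # Destination cannot have outgoing edges
--     if graph.get(destination):
--         return False
--
--     # color[node]: 'gray' = on the current path, True/False = finished with that verdict
--     color = {}
--     stack = [(source, 0)]   # (node, number of neighbors already resolved)
--     ret = True              # value produced by the most recently finished call
--     while stack:
--         node, i = stack.pop()
--         nbrs = graph.get(node, [])
--         if i == 0:
--             st = color.get(node)
--             if st == 'gray':
--                 ret = False          # back edge: cycle on current path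
--                 continue
--             if st is not None:
--                 ret = st             # already finished
--                 continue
--             if not nbrs:
--                 color[node] = (node == destination)
--                 ret = color[node]
--                 continue
--             color[node] = 'gray'
--         else:
--             if not ret:
--                 color[node] = False  # a neighbor failed: short-circuit
--                 continue
--             if i == len(nbrs):
--                 color[node] = True   # all neighbors succeeded
--                 continue
--         stack.append((node, i + 1))
--         stack.append((nbrs[i], 0))
--     return ret
-- ===== Notes on version B (the rewrite author's own statement) =====
-- stated objective: alternative
-- what changed: The recursive memoized DFS (memo dict + visiting set, implicit call stack) is replaced by an iterative three-color DFS: an explicit stack of (node, resolved-neighbor-count) frames and one color map (gray = on current path, True/False = finished verdict), so B uses no recursion at all.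
-- outside the precondition, e.g. on leadsToDestination_memoized_dfs(3, [[0, 1], [2]], 0, 1): A raises ValueError, B raises ValueError
import Mathlib
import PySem

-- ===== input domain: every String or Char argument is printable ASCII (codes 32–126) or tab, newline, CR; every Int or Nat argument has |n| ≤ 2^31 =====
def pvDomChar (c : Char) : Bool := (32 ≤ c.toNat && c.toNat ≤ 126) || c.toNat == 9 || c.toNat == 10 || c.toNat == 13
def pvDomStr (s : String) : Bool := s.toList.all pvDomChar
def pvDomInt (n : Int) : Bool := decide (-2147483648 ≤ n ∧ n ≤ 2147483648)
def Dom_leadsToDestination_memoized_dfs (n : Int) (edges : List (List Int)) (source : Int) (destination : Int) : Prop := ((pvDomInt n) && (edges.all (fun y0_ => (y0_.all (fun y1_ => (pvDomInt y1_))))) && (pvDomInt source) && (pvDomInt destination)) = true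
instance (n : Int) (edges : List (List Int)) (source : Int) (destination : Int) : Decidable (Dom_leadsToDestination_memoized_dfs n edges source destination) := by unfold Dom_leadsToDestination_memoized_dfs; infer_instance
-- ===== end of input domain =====

-- B re-implements A's recursive memoized DFS as an iterative three-color DFS with an
-- explicit stack (same values everywhere on Pre_; objective: alternative structure, and
-- B avoids Python's recursion).

-- ===== PORT A =====

-- graph = defaultdict(list); for u, v in edges: graph[u].append(v)
-- (rows that are not 2-element lists raise ValueError in Python: outside Pre_, skipped here)
def pvGraphA (edges : List (List Int)) : PySem.Dict Int (List Int) :=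
  edges.foldl (fun g e =>
    match e with
    | [u, v] => g.modify u [] (fun l => l ++ [v])
    | _ => g) PySem.Dict.empty

-- the `for neighbor in graph[node]` loop of dfs, with its break on a failing neighbor
def pvLoopA (dfs : Int → PySem.Dict Int Bool → PySem.Set Int → Option (Bool × PySem.Dict Int Bool × PySem.Set Int)) :
    List Int → PySem.Dict Int Bool → PySem.Set Int → Option (Bool × PySem.Dict Int Bool × PySem.Set Int)
  | [], memo, vis => some (true, memo, vis)
  | x :: xs, memo, vis =>
    match dfs x memo vis with
    | none => none
    | some (b, memo', vis') => if b then pvLoopA dfs xs memo' vis' else some (false, memo', vis')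

-- dfs(node) threading the mutable memo dict and visiting set; fuel only makes the
-- recursion structural (never exhausted: see pvDfsA_total below)
def pvDfsA (g : PySem.Dict Int (List Int)) (dest : Int) :
    Nat → Int → PySem.Dict Int Bool → PySem.Set Int → Option (Bool × PySem.Dict Int Bool × PySem.Set Int)
  | 0, _, _, _ => none
  | fuel+1, node, memo, vis =>
    match memo.get? node with
    | some b => some (b, memo, vis)
    | none =>
      if PySem.Set.contains vis node then some (false, memo, vis)
      else if g.getD node [] = [] then
        some (node == dest, memo.insert node (node == dest), vis)
      else
        match pvLoopA (pvDfsA g dest fuel) (g.getD node []) memo (PySem.Set.add vis node) with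
        | none => none
        | some (r, memo', vis') =>
          -- visiting.remove(node) (node is always present: discard = remove); memo[node] = result
          some (r, memo'.insert node r, PySem.Set.discard vis' node)

def leadsToDestination_memoized_dfs (n : Int) (edges : List (List Int)) (source : Int) (destination : Int) : Bool :=
  let g := pvGraphA edges
  if g.getD destination [] ≠ [] then false
  else
    match pvDfsA g destination (edges.length + 2) source PySem.Dict.empty PySem.Set.empty with
    | some (r, _, _) => r
    | none => false

-- ===== PORT B =====

-- color[node] in Source B: 'gray' while on the current path, else the finished verdict
inductive PvColor where
  | gray : PvColor
  | done : Bool → PvColor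
deriving DecidableEq, Repr

-- graph = {}; for u, v in edges: graph.setdefault(u, []).append(v)  (same append-at-u
-- effect as A's defaultdict line; malformed rows are outside Pre_, skipped here)
def pvGraphB (edges : List (List Int)) : PySem.Dict Int (List Int) :=
  edges.foldl (fun g e =>
    match e with
    | [u, v] => g.modify u [] (fun l => l ++ [v])
    | _ => g) PySem.Dict.empty

-- the while-loop of Source B: frames are (node, #neighbors already resolved), `ret` is the
-- verdict of the most recently finished call; fuel only makes the loop structural
def pvRunB (g : PySem.Dict Int (List Int)) (dest : Int) :
    Nat → List (Int × Nat) → PySem.Dict Int PvColor → Bool → Option Bool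
  | 0, _, _, _ => none
  | _+1, [], _, ret => some ret
  | fuel+1, (node, i) :: stack, color, ret =>
    let nbrs := g.getD node []
    if i = 0 then
      match color.get? node with
      | some PvColor.gray => pvRunB g dest fuel stack color false
      | some (PvColor.done b) => pvRunB g dest fuel stack color b
      | none =>
        if nbrs = [] then
          pvRunB g dest fuel stack (color.insert node (PvColor.done (node == dest))) (node == dest)
        else
          pvRunB g dest fuel ((nbrs.getD 0 0, 0) :: (node, 1) :: stack) (color.insert node PvColor.gray) ret
    else
      if ret = false then
        pvRunB g dest fuel stack (color.insert node (PvColor.done false)) false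
      else if i = nbrs.length then
        pvRunB g dest fuel stack (color.insert node (PvColor.done true)) true
      else
        pvRunB g dest fuel ((nbrs.getD i 0, 0) :: (node, i + 1) :: stack) color ret

def leadsToDestination_memoized_dfs_alt (n : Int) (edges : List (List Int)) (source : Int) (destination : Int) : Bool :=
  let g := pvGraphB edges
  if g.getD destination [] ≠ [] then false
  else
    match pvRunB g destination ((edges.length + 2) ^ (edges.length + 3) + 1) [(source, 0)] PySem.Dict.empty true with
    | some r => r
    | none => false

-- ===== PRECONDITION & SPEC =====
-- Pre_ excludes edge rows that are not 2-element lists, on which both Pythons raise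
-- ValueError while unpacking `for u, v in edges`.
def Pre_leadsToDestination_memoized_dfs (n : Int) (edges : List (List Int)) (source : Int) (destination : Int) : Prop :=
  ∀ e ∈ edges, e.length = 2
instance (n : Int) (edges : List (List Int)) (source : Int) (destination : Int) : Decidable (Pre_leadsToDestination_memoized_dfs n edges source destination) := by unfold Pre_leadsToDestination_memoized_dfs; infer_instance
def pvWitness_leadsToDestination_memoized_dfs : Int × List (List Int) × Int × Int := (4, [[0, 1], [1, 2], [0, 2]], 0, 2)

def Spec_leadsToDestination_memoized_dfs (n : Int) (edges : List (List Int)) (source : Int) (destination : Int) (out : Bool) : Prop := out = leadsToDestination_memoized_dfs_alt n edges source destination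
instance (n : Int) (edges : List (List Int)) (source : Int) (destination : Int) (out : Bool) : Decidable (Spec_leadsToDestination_memoized_dfs n edges source destination out) := by unfold Spec_leadsToDestination_memoized_dfs; infer_instance

-- ===== CLAIM (what is proved, stated in full; the proofs are below) =====
def Claim_equal_leadsToDestination_memoized_dfs : Prop := ∀ (n : Int) (edges : List (List Int)) (source : Int) (destination : Int), Dom_leadsToDestination_memoized_dfs n edges source destination → Pre_leadsToDestination_memoized_dfs n edges source destination → Spec_leadsToDestination_memoized_dfs n edges source destination (leadsToDestination_memoized_dfs n edges source destination)

-- ===== LEMMAS AND PROOFS =====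

-- A's state (memo, visiting) determines B's color map: memo wins (A checks it first),
-- then a visiting node is gray, otherwise uncolored.
def pvRel (memo : PySem.Dict Int Bool) (vis : PySem.Set Int) (color : PySem.Dict Int PvColor) : Prop :=
  ∀ x : Int, color.get? x =
    match memo.get? x with
    | some b => some (PvColor.done b)
    | none => if PySem.Set.contains vis x then some PvColor.gray else none

theorem pvRel_empty : pvRel PySem.Dict.empty PySem.Set.empty PySem.Dict.empty := by
  intro x
  simp [pysem, PySem.Set.empty]

theorem pvRel_gray (memo : PySem.Dict Int Bool) (vis : PySem.Set Int) (color : PySem.Dict Int PvColor)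
    (node : Int) (h : pvRel memo vis color) (hm : memo.get? node = none) :
    pvRel memo (PySem.Set.add vis node) (color.insert node PvColor.gray) := by
  intro x
  by_cases hx : x = node
  · subst hx
    simp [PySem.Dict.get?_insert_self, hm, PySem.Set.contains_eq_listContains, PySem.Set.mem_add]
  · rw [PySem.Dict.get?_insert_of_ne _ _ hx, h x]
    have : PySem.Set.contains (PySem.Set.add vis node) x = PySem.Set.contains vis x := by
      simp [PySem.Set.contains_eq_listContains, PySem.Set.mem_add, hx]
    rw [this]

theorem pvRel_finish (memo : PySem.Dict Int Bool) (vis : PySem.Set Int) (color : PySem.Dict Int PvColor)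
    (node : Int) (r : Bool) (h : pvRel memo vis color) :
    pvRel (memo.insert node r) (PySem.Set.discard vis node) (color.insert node (PvColor.done r)) := by
  intro x
  by_cases hx : x = node
  · subst hx
    simp [PySem.Dict.get?_insert_self]
  · rw [PySem.Dict.get?_insert_of_ne _ _ hx, PySem.Dict.get?_insert_of_ne _ _ hx, h x]
    have : PySem.Set.contains (PySem.Set.discard vis node) x = PySem.Set.contains vis x := by
      simp [PySem.Set.contains_eq_listContains, PySem.Set.mem_discard, hx]
    rw [this]

theorem pvRel_leaf (memo : PySem.Dict Int Bool) (vis : PySem.Set Int) (color : PySem.Dict Int PvColor)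
    (node : Int) (r : Bool) (h : pvRel memo vis color) (hv : PySem.Set.contains vis node = false) :
    pvRel (memo.insert node r) vis (color.insert node (PvColor.done r)) := by
  intro x
  by_cases hx : x = node
  · subst hx
    simp [PySem.Dict.get?_insert_self]
  · rw [PySem.Dict.get?_insert_of_ne _ _ hx, PySem.Dict.get?_insert_of_ne _ _ hx, h x]

-- dfs restores the visiting set (as a set) and never memoizes a node that is visiting
theorem pvPres (g : PySem.Dict Int (List Int)) (dest : Int) : ∀ f : Nat,
    (∀ node memo vis r m' v', pvDfsA g dest f node memo vis = some (r, m', v') →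
      (∀ x : Int, x ∈ v' ↔ x ∈ vis) ∧ (∀ x : Int, x ∈ vis → m'.get? x = memo.get? x))
    ∧ (∀ xs memo vis r m' v', pvLoopA (pvDfsA g dest f) xs memo vis = some (r, m', v') →
      (∀ x : Int, x ∈ v' ↔ x ∈ vis) ∧ (∀ x : Int, x ∈ vis → m'.get? x = memo.get? x)) := by
  intro f
  induction f with
  | zero =>
    refine ⟨?_, ?_⟩
    · intro node memo vis r m' v' h
      simp [pvDfsA] at h
    · intro xs memo vis r m' v' h
      cases xs with
      | nil =>
        simp only [pvLoopA, Option.some.injEq, Prod.mk.injEq] at h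
        obtain ⟨-, h2, h3⟩ := h
        subst h2; subst h3
        exact ⟨fun x => Iff.rfl, fun x _ => rfl⟩
      | cons x t =>
        simp [pvLoopA, pvDfsA] at h
  | succ f ihf =>
    have hd : ∀ node memo vis r m' v', pvDfsA g dest (f+1) node memo vis = some (r, m', v') →
        (∀ x : Int, x ∈ v' ↔ x ∈ vis) ∧ (∀ x : Int, x ∈ vis → m'.get? x = memo.get? x) := by
      intro node memo vis r m' v' h
      simp only [pvDfsA] at h
      split at h
      · rename_i b hm
        simp only [Option.some.injEq, Prod.mk.injEq] at h
        obtain ⟨-, h2, h3⟩ := h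
        subst h2; subst h3
        exact ⟨fun x => Iff.rfl, fun x _ => rfl⟩
      · rename_i hm
        split at h
        · simp only [Option.some.injEq, Prod.mk.injEq] at h
          obtain ⟨-, h2, h3⟩ := h
          subst h2; subst h3
          exact ⟨fun x => Iff.rfl, fun x _ => rfl⟩
        · rename_i hcon
          have hnode : node ∉ vis := by
            intro hx
            rw [(PySem.Set.contains_iff vis node).mpr hx] at hcon
            exact hcon rfl
          split at h
          · simp only [Option.some.injEq, Prod.mk.injEq] at h
            obtain ⟨-, h2, h3⟩ := h
            subst h2; subst h3
            refine ⟨fun x => Iff.rfl, fun x hx => ?_⟩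
            exact PySem.Dict.get?_insert_of_ne _ _ (fun hxe => hnode (hxe ▸ hx))
          · split at h
            · exact absurd h (by simp)
            · rename_i r0 m0 v0 hloop
              simp only [Option.some.injEq, Prod.mk.injEq] at h
              obtain ⟨h1, h2, h3⟩ := h
              subst h1; subst h2; subst h3
              obtain ⟨hv0, hm0⟩ := (ihf.2) _ _ _ _ _ _ hloop
              refine ⟨fun x => ?_, fun x hx => ?_⟩
              · rw [PySem.Set.mem_discard]
                rw [hv0 x, PySem.Set.mem_add]
                constructor
                · rintro ⟨hx | hx, hne⟩
                  · exact hx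
                  · exact absurd hx hne
                · intro hx
                  exact ⟨Or.inl hx, fun hxe => hnode (hxe ▸ hx)⟩
              · have hxne : x ≠ node := fun hxe => hnode (hxe ▸ hx)
                rw [PySem.Dict.get?_insert_of_ne _ _ hxne]
                exact hm0 x (by rw [PySem.Set.mem_add]; exact Or.inl hx)
    refine ⟨hd, ?_⟩
    intro xs
    induction xs with
    | nil =>
      intro memo vis r m' v' h
      simp only [pvLoopA, Option.some.injEq, Prod.mk.injEq] at h
      obtain ⟨-, h2, h3⟩ := h
      subst h2; subst h3
      exact ⟨fun x => Iff.rfl, fun x _ => rfl⟩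
    | cons x t ih =>
      intro memo vis r m' v' h
      simp only [pvLoopA] at h
      split at h
      · exact absurd h (by simp)
      · rename_i b m0 v0 hcall
        obtain ⟨hv0, hm0⟩ := hd _ _ _ _ _ _ hcall
        split at h
        · obtain ⟨hv1, hm1⟩ := ih _ _ _ _ _ h
          refine ⟨fun y => (hv1 y).trans (hv0 y), fun y hy => ?_⟩
          rw [hm1 y ((hv0 y).mpr hy)]
          exact hm0 y hy
        · simp only [Option.some.injEq, Prod.mk.injEq] at h
          obtain ⟨-, h2, h3⟩ := h
          subst h2; subst h3
          exact ⟨hv0, hm0⟩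

def pvMeasure (g : PySem.Dict Int (List Int)) (vis : PySem.Set Int) : Nat :=
  (g.keys.filter (fun k => !PySem.Set.contains vis k)).length

theorem pvMem_keys_of_getD_ne (g : PySem.Dict Int (List Int)) (node : Int)
    (h : g.getD node [] ≠ []) : node ∈ g.keys := by
  by_cases hc : g.contains node = true
  · exact (PySem.Dict.contains_iff_mem_keys _ _).mp hc
  · exact absurd (PySem.Dict.getD_of_not_contains _ _ (by simpa using hc)) h

theorem pvContains_add (vis : PySem.Set Int) (node x : Int) (hx : x ≠ node) :
    PySem.Set.contains (PySem.Set.add vis node) x = PySem.Set.contains vis x := by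
  simp [PySem.Set.contains_eq_listContains, PySem.Set.mem_add, hx]

theorem pvMeasure_congr (g : PySem.Dict Int (List Int)) (v1 v2 : PySem.Set Int)
    (h : ∀ x : Int, x ∈ v1 ↔ x ∈ v2) : pvMeasure g v1 = pvMeasure g v2 := by
  unfold pvMeasure
  congr 1
  refine List.filter_congr (fun k _ => ?_)
  simp [PySem.Set.contains_eq_listContains, h k]

theorem pvMeasure_add_lt (g : PySem.Dict Int (List Int)) (vis : PySem.Set Int) (node : Int)
    (hn : node ∉ vis) (hk : node ∈ g.keys) :
    pvMeasure g (PySem.Set.add vis node) < pvMeasure g vis := by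
  have hle : ∀ l : List Int,
      (l.filter (fun k => !PySem.Set.contains (PySem.Set.add vis node) k)).length ≤
      (l.filter (fun k => !PySem.Set.contains vis k)).length := by
    intro l
    refine List.Sublist.length_le (List.monotone_filter_right l (fun a ha => ?_))
    simp only [Bool.not_eq_eq_eq_not, Bool.not_true, Bool.not_eq_true'] at ha ⊢
    simp only [PySem.Set.contains_eq_listContains] at ha ⊢
    simp only [List.contains_eq_mem, decide_eq_false_iff_not] at ha ⊢
    intro hmem
    exact ha (by rw [PySem.Set.mem_add]; exact Or.inl hmem)
  have main : ∀ l : List Int, node ∈ l →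
      (l.filter (fun k => !PySem.Set.contains (PySem.Set.add vis node) k)).length <
      (l.filter (fun k => !PySem.Set.contains vis k)).length := by
    intro l hl
    induction l with
    | nil => cases hl
    | cons a t ih =>
      by_cases ha : a = node
      · subst ha
        have h1 : PySem.Set.contains (PySem.Set.add vis a) a = true := by
          simp [PySem.Set.contains_eq_listContains, PySem.Set.mem_add]
        have h2 : PySem.Set.contains vis a = false := by
          simp [PySem.Set.contains_eq_listContains]
          exact hn
        simp only [List.filter_cons, h1, h2, Bool.not_true, Bool.not_false, if_neg, List.length_cons]
        calc (t.filter (fun k => !PySem.Set.contains (PySem.Set.add vis a) k)).length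
            ≤ (t.filter (fun k => !PySem.Set.contains vis k)).length := hle t
          _ < (t.filter (fun k => !PySem.Set.contains vis k)).length + 1 := by omega
      · have hmem : node ∈ t := by
          cases hl with
          | head => exact absurd rfl ha
          | tail _ h => exact h
        have heq : PySem.Set.contains (PySem.Set.add vis node) a = PySem.Set.contains vis a :=
          pvContains_add vis node a ha
        simp only [List.filter_cons, heq]
        have := ih hmem
        split
        · simp only [List.length_cons]
          omega
        · omega
  exact main g.keys hk

theorem pvDfsA_total (g : PySem.Dict Int (List Int)) (dest : Int) : ∀ f : Nat,
    (∀ node memo vis, pvMeasure g vis < f → ∃ out, pvDfsA g dest f node memo vis = some out)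
    ∧ (∀ xs memo vis, pvMeasure g vis < f → ∃ out, pvLoopA (pvDfsA g dest f) xs memo vis = some out) := by
  intro f
  induction f with
  | zero =>
    exact ⟨fun node memo vis h => absurd h (Nat.not_lt_zero _),
           fun xs memo vis h => absurd h (Nat.not_lt_zero _)⟩
  | succ f ihf =>
    have hd : ∀ node memo vis, pvMeasure g vis < f + 1 →
        ∃ out, pvDfsA g dest (f+1) node memo vis = some out := by
      intro node memo vis hme
      simp only [pvDfsA]
      rcases hm : memo.get? node with _ | b
      · by_cases hnv : node ∈ vis
        · simp [hm, hnv]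
        · by_cases hleaf : g.getD node [] = []
          · simp [hm, hnv, hleaf]
          · have hk := pvMem_keys_of_getD_ne g node hleaf
            have hlt : pvMeasure g (PySem.Set.add vis node) < f := by
              have := pvMeasure_add_lt g vis node hnv hk
              omega
            obtain ⟨⟨r0, m0, v0⟩, hout⟩ := ihf.2 (g.getD node []) memo (PySem.Set.add vis node) hlt
            rw [PySem.Set.add_of_not_mem hnv] at hout
            simp [hm, hnv, hleaf, hout]
      · simp [hm]
    refine ⟨hd, ?_⟩
    intro xs
    induction xs with
    | nil => intro memo vis _; exact ⟨_, rfl⟩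
    | cons x t ih =>
      intro memo vis hme
      obtain ⟨⟨b, m0, v0⟩, hcall⟩ := hd x memo vis hme
      have hv := ((pvPres g dest (f+1)).1 _ _ _ _ _ _ hcall).1
      have hme0 : pvMeasure g v0 < f + 1 := by
        rw [pvMeasure_congr g v0 vis hv]; exact hme
      obtain ⟨out, hout⟩ := ih m0 v0 hme0
      simp only [pvLoopA, hcall]
      by_cases hb : b = true
      · subst hb; simp [hout]
      · simp only [Bool.not_eq_true] at hb; subst hb; simp

-- the terminating resume step of B's machine: all neighbors of `node` succeeded
theorem pvSimLoopNil (g : PySem.Dict Int (List Int)) (dest : Int) (node : Int) (i : Nat)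
    (hi0 : i ≠ 0) (hlen : i = (g.getD node []).length) (color : PySem.Dict Int PvColor) :
    ∀ (stack : List (Int × Nat)) (fb : Nat),
      pvRunB g dest (fb + 1) ((node, i) :: stack) color true =
        pvRunB g dest fb stack (color.insert node (PvColor.done true)) true := by
  intro stack fb
  have hne : g.getD node [] ≠ [] := by
    intro he
    rw [he] at hlen
    simp at hlen
    exact hi0 hlen
  simp only [pvRunB]
  simp [hi0, hlen, hne]

-- the big simulation: B's machine consumes k steps of fuel to do exactly what one call
-- of A's dfs (resp. the rest of A's neighbor loop) does
set_option maxHeartbeats 1000000 in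
theorem pvSim (g : PySem.Dict Int (List Int)) (dest : Int) (E : Nat)
    (hdeg : ∀ u : Int, (g.getD u []).length ≤ E) : ∀ f : Nat,
    (∀ node memo vis r m' v', pvDfsA g dest f node memo vis = some (r, m', v') →
      ∀ color, pvRel memo vis color →
      ∃ color' k, pvRel m' v' color' ∧ k ≤ (E+2)^(f+1) ∧
        ∀ stack ret fb, pvRunB g dest (fb + k) ((node, 0) :: stack) color ret = pvRunB g dest fb stack color' r)
    ∧ (∀ xs i node memo vis r m' v', pvLoopA (pvDfsA g dest f) xs memo vis = some (r, m', v') →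
      xs = (g.getD node []).drop i → 1 ≤ i → i ≤ (g.getD node []).length →
      ∀ color, pvRel memo vis color →
      ∃ color' k, pvRel m' v' color' ∧ k ≤ xs.length * ((E+2)^(f+1) + 1) + 1 ∧
        ∀ stack fb, pvRunB g dest (fb + k) ((node, i) :: stack) color true =
          pvRunB g dest fb stack (color'.insert node (PvColor.done r)) r) := by
  intro f
  have hX1 : ∀ m : Nat, 1 ≤ (E+2)^m := fun m => Nat.one_le_pow _ _ (by omega)
  induction f with
  | zero =>
    refine ⟨?_, ?_⟩
    · intro node memo vis r m' v' h
      simp [pvDfsA] at h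
    · intro xs i node memo vis r m' v' h hxs hi1 hilen color hrel
      cases xs with
      | cons x t => simp [pvLoopA, pvDfsA] at h
      | nil =>
        simp only [pvLoopA, Option.some.injEq, Prod.mk.injEq] at h
        obtain ⟨hr, rfl, rfl⟩ := h
        rw [← hr]
        have hlen : i = (g.getD node []).length := by
          have := congrArg List.length hxs
          simp [List.length_drop] at this
          omega
        exact ⟨color, 1, hrel, by simp,
               pvSimLoopNil g dest node i (by omega) hlen color⟩
  | succ f ihf =>
    have hX : E + 2 ≤ (E+2)^(f+1) := Nat.le_self_pow (by omega) _
    have hd : ∀ node memo vis r m' v', pvDfsA g dest (f+1) node memo vis = some (r, m', v') →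
        ∀ color, pvRel memo vis color →
        ∃ color' k, pvRel m' v' color' ∧ k ≤ (E+2)^(f+1+1) ∧
          ∀ stack ret fb, pvRunB g dest (fb + k) ((node, 0) :: stack) color ret =
            pvRunB g dest fb stack color' r := by
      intro node memo vis r m' v' h color hrel
      simp only [pvDfsA] at h
      split at h
      · -- memo hit
        rename_i b hm
        simp only [Option.some.injEq, Prod.mk.injEq] at h
        obtain ⟨hr, rfl, rfl⟩ := h
        rw [← hr]
        have hcol : color.get? node = some (PvColor.done b) := by rw [hrel node, hm]
        refine ⟨color, 1, hrel, by have := hX1 (f+1+1); omega, ?_⟩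
        intro stack ret fb
        simp only [pvRunB]
        simp [hcol]
      · rename_i hm
        split at h
        · -- visiting hit (cycle)
          rename_i hcon
          simp only [Option.some.injEq, Prod.mk.injEq] at h
          obtain ⟨hr, rfl, rfl⟩ := h
          rw [← hr]
          have hcol : color.get? node = some PvColor.gray := by
            rw [hrel node, hm]
            simp only [hcon]
            simp
          refine ⟨color, 1, hrel, by have := hX1 (f+1+1); omega, ?_⟩
          intro stack ret fb
          simp only [pvRunB]
          simp [hcol]
        · rename_i hcon
          have hconf : PySem.Set.contains vis node = false := by
            cases hcv : PySem.Set.contains vis node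
            · rfl
            · exact absurd hcv hcon
          have hcol : color.get? node = none := by
            rw [hrel node, hm, hconf]
            simp
          split at h
          · -- leaf
            rename_i hleaf
            simp only [Option.some.injEq, Prod.mk.injEq] at h
            obtain ⟨hr, rfl, rfl⟩ := h
            rw [← hr]
            refine ⟨color.insert node (PvColor.done (node == dest)), 1,
                    pvRel_leaf _ _ _ _ _ hrel hconf,
                    by have := hX1 (f+1+1); omega, ?_⟩
            intro stack ret fb
            simp only [pvRunB]
            simp [hcol, hleaf]
          · -- interior node: gray it and run the children
            rename_i hleaf
            split at h
            · exact absurd h (by simp)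
            · rename_i r0 m0 v0 hloop
              simp only [Option.some.injEq, Prod.mk.injEq] at h
              obtain ⟨hr, rfl, rfl⟩ := h
              rw [← hr]
              obtain ⟨nb, rest, hnbrs⟩ := List.exists_cons_of_ne_nil hleaf
              rw [hnbrs] at hloop
              simp only [pvLoopA] at hloop
              split at hloop
              · exact absurd hloop (by simp)
              · rename_i b0 mm0 vv0 hcall
                have hrelg : pvRel memo (PySem.Set.add vis node) (color.insert node PvColor.gray) :=
                  pvRel_gray _ _ _ _ hrel hm
                obtain ⟨color0, k0, hrel0, hk0, heq0⟩ := ihf.1 _ _ _ _ _ _ hcall _ hrelg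
                have hlen1 : 1 ≤ (g.getD node []).length := by rw [hnbrs]; simp
                have hdegn : (g.getD node []).length ≤ E := hdeg node
                have hrl : rest.length + 1 ≤ E := by
                  rw [hnbrs] at hdegn
                  simpa using hdegn
                split at hloop
                · -- first child succeeded: continue with the rest of the loop
                  rename_i hb0
                  subst hb0
                  obtain ⟨colorL, kL, hrelL, hkL, heqL⟩ := ihf.2 rest 1 node mm0 vv0 _ _ _ hloop
                    (by rw [hnbrs]; simp) (by omega) hlen1 color0 hrel0
                  refine ⟨colorL.insert node (PvColor.done r0), 1 + k0 + kL,
                          pvRel_finish _ _ _ _ _ hrelL, ?_, ?_⟩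
                  · have hm1 : (rest.length + 1) * ((E+2)^(f+1) + 1) ≤ E * ((E+2)^(f+1) + 1) :=
                      Nat.mul_le_mul_right _ hrl
                    have hm2 : (rest.length + 1) * ((E+2)^(f+1) + 1) =
                        rest.length * ((E+2)^(f+1) + 1) + ((E+2)^(f+1) + 1) := Nat.succ_mul _ _
                    have hm3 : E * ((E+2)^(f+1) + 1) = E * (E+2)^(f+1) + E := Nat.mul_succ _ _
                    have hm4 : (E+2) * (E+2)^(f+1) = E * (E+2)^(f+1) + 2 * (E+2)^(f+1) :=
                      Nat.add_mul _ _ _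
                    have hpow : (E+2)^(f+1+1) = (E+2) * (E+2)^(f+1) := by ring
                    omega
                  · intro stack ret fb
                    have harith : fb + (1 + k0 + kL) = ((fb + kL) + k0) + 1 := by omega
                    rw [harith]
                    have hstep : pvRunB g dest (((fb + kL) + k0) + 1) ((node, 0) :: stack) color ret =
                        pvRunB g dest ((fb + kL) + k0) ((nb, 0) :: (node, 1) :: stack)
                          (color.insert node PvColor.gray) ret := by
                      simp only [pvRunB]
                      simp [hcol, hleaf, hnbrs]
                    rw [hstep, heq0, heqL]
                · -- first child failed: break out of the loop
                  rename_i hb0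
                  have hb0f : b0 = false := by cases b0 <;> simp_all
                  subst hb0f
                  simp only [Option.some.injEq, Prod.mk.injEq] at hloop
                  obtain ⟨hr0, rfl, rfl⟩ := hloop
                  rw [← hr0]
                  refine ⟨color0.insert node (PvColor.done false), 1 + k0 + 1,
                          pvRel_finish _ _ _ _ _ hrel0, ?_, ?_⟩
                  · have hmul2 : 2 * (E+2)^(f+1) ≤ (E+2) * (E+2)^(f+1) :=
                      Nat.mul_le_mul_right _ (by omega)
                    have hpow : (E+2)^(f+1+1) = (E+2) * (E+2)^(f+1) := by ring
                    omega
                  · intro stack ret fb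
                    have harith : fb + (1 + k0 + 1) = ((fb + 1) + k0) + 1 := by omega
                    rw [harith]
                    have hstep : pvRunB g dest (((fb + 1) + k0) + 1) ((node, 0) :: stack) color ret =
                        pvRunB g dest ((fb + 1) + k0) ((nb, 0) :: (node, 1) :: stack)
                          (color.insert node PvColor.gray) ret := by
                      simp only [pvRunB]
                      simp [hcol, hleaf, hnbrs]
                    rw [hstep, heq0]
                    have hstep2 : pvRunB g dest (fb + 1) ((node, 1) :: stack) color0 false =
                        pvRunB g dest fb stack (color0.insert node (PvColor.done false)) false := by
                      simp only [pvRunB]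
                      simp
                    rw [hstep2]
    refine ⟨hd, ?_⟩
    intro xs
    induction xs with
    | nil =>
      intro i node memo vis r m' v' h hxs hi1 hilen color hrel
      simp only [pvLoopA, Option.some.injEq, Prod.mk.injEq] at h
      obtain ⟨hr, rfl, rfl⟩ := h
      rw [← hr]
      have hlen : i = (g.getD node []).length := by
        have := congrArg List.length hxs
        simp [List.length_drop] at this
        omega
      exact ⟨color, 1, hrel, by simp,
             pvSimLoopNil g dest node i (by omega) hlen color⟩
    | cons x t ih =>
      intro i node memo vis r m' v' h hxs hi1 hilen color hrel
      have hilt : i < (g.getD node []).length := by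
        have := congrArg List.length hxs
        simp [List.length_drop] at this
        omega
      have hidx : (g.getD node [])[i]? = some x := by
        rw [← List.head?_drop, ← hxs]
        rfl
      have hdropt : (g.getD node []).drop (i+1) = t := by
        have hh : ((g.getD node []).drop i).tail = (g.getD node []).drop (i + 1) :=
          List.tail_drop
        rw [← hxs] at hh
        simpa using hh.symm
      simp only [pvLoopA] at h
      split at h
      · exact absurd h (by simp)
      · rename_i b0 mm0 vv0 hcall
        obtain ⟨color0, k0, hrel0, hk0, heq0⟩ := hd _ _ _ _ _ _ hcall _ hrel
        split at h
        · -- child i succeeded: continue with the rest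
          rename_i hb0
          subst hb0
          obtain ⟨colorL, kL, hrelL, hkL, heqL⟩ := ih (i+1) node mm0 vv0 _ _ _ h
            hdropt.symm (by omega) (by omega) color0 hrel0
          refine ⟨colorL, 1 + k0 + kL, hrelL, ?_, ?_⟩
          · have hmul : (t.length + 1) * ((E+2)^(f+1+1) + 1) =
                t.length * ((E+2)^(f+1+1) + 1) + ((E+2)^(f+1+1) + 1) := Nat.succ_mul _ _
            simp only [List.length_cons]
            omega
          · intro stack fb
            have harith : fb + (1 + k0 + kL) = ((fb + kL) + k0) + 1 := by omega
            rw [harith]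
            have hstep : pvRunB g dest (((fb + kL) + k0) + 1) ((node, i) :: stack) color true =
                pvRunB g dest ((fb + kL) + k0) ((x, 0) :: (node, i + 1) :: stack) color true := by
              simp only [pvRunB]
              simp [show ¬ i = 0 by omega, show ¬ i = (g.getD node []).length by omega, hidx]
            rw [hstep, heq0, heqL]
        · -- child i failed: break
          rename_i hb0
          have hb0f : b0 = false := by cases b0 <;> simp_all
          subst hb0f
          simp only [Option.some.injEq, Prod.mk.injEq] at h
          obtain ⟨hr0, rfl, rfl⟩ := h
          rw [← hr0]
          refine ⟨color0, 1 + k0 + 1, hrel0, ?_, ?_⟩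
          · have hmul : (t.length + 1) * ((E+2)^(f+1+1) + 1) =
                t.length * ((E+2)^(f+1+1) + 1) + ((E+2)^(f+1+1) + 1) := Nat.succ_mul _ _
            have := hX1 (f+1+1)
            simp only [List.length_cons]
            omega
          · intro stack fb
            have harith : fb + (1 + k0 + 1) = ((fb + 1) + k0) + 1 := by omega
            rw [harith]
            have hstep : pvRunB g dest (((fb + 1) + k0) + 1) ((node, i) :: stack) color true =
                pvRunB g dest ((fb + 1) + k0) ((x, 0) :: (node, i + 1) :: stack) color true := by
              simp only [pvRunB]
              simp [show ¬ i = 0 by omega, show ¬ i = (g.getD node []).length by omega, hidx]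
            rw [hstep, heq0]
            have hstep2 : pvRunB g dest (fb + 1) ((node, i + 1) :: stack) color0 false =
                pvRunB g dest fb stack (color0.insert node (PvColor.done false)) false := by
              simp only [pvRunB]
              simp
            rw [hstep2]

theorem pvGraph_keys_le (edges : List (List Int)) : (pvGraphA edges).keys.length ≤ edges.length := by
  have main : ∀ (l : List (List Int)) (d : PySem.Dict Int (List Int)),
      ((l.foldl (fun g e =>
        match e with
        | [u, v] => g.modify u [] (fun l => l ++ [v])
        | _ => g) d).keys).length ≤ d.keys.length + l.length := by
    intro l
    induction l with
    | nil => intro d; simp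
    | cons e t ih =>
      intro d
      match e with
      | [] => simpa using (ih d).trans (by omega)
      | [u] => simpa using (ih d).trans (by omega)
      | u :: v :: w :: rest => simpa using (ih d).trans (by omega)
      | [u, v] =>
        refine le_trans (by simpa using ih (d.modify u [] (fun l => l ++ [v]))) ?_
        have : (d.insert u (d.getD u [] ++ [v])).keys.length ≤ d.keys.length + 1 := by
          by_cases hc : d.contains u = true <;>
            simp [PySem.Dict.keys_insert_of_contains, PySem.Dict.keys_insert_of_not_contains, hc]
        simp only [List.length_cons]
        omega
  simpa using main edges PySem.Dict.empty

theorem pvGraph_deg_le (edges : List (List Int)) (u : Int) :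
    ((pvGraphA edges).getD u []).length ≤ edges.length := by
  have main : ∀ (l : List (List Int)) (d : PySem.Dict Int (List Int)),
      ((l.foldl (fun g e =>
        match e with
        | [u, v] => g.modify u [] (fun l => l ++ [v])
        | _ => g) d).getD u []).length ≤ (d.getD u []).length + l.length := by
    intro l
    induction l with
    | nil => intro d; simp
    | cons e t ih =>
      intro d
      match e with
      | [] => simpa using (ih d).trans (by omega)
      | [a] => simpa using (ih d).trans (by omega)
      | a :: b :: c :: rest => simpa using (ih d).trans (by omega)
      | [a, b] =>
        refine le_trans (by simpa using ih (d.modify a [] (fun l => l ++ [b]))) ?_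
        have : ((d.insert a (d.getD a [] ++ [b])).getD u []).length ≤ (d.getD u []).length + 1 := by
          rw [PySem.Dict.getD_insert]
          split <;> simp_all
        have hmod : (d.modify a [] fun l => l ++ [b]) = d.insert a (d.getD a [] ++ [b]) := rfl
        rw [hmod]
        simp only [List.length_cons]
        omega
  simpa using main edges PySem.Dict.empty

-- ===== VERDICT (by name: the statement is the Claim_ definition above) =====
theorem leadsToDestination_memoized_dfs_spec : Claim_equal_leadsToDestination_memoized_dfs := by
  unfold Claim_equal_leadsToDestination_memoized_dfs
  intro n edges source destination _ _
  unfold Spec_leadsToDestination_memoized_dfs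
  show leadsToDestination_memoized_dfs n edges source destination =
       leadsToDestination_memoized_dfs_alt n edges source destination
  unfold leadsToDestination_memoized_dfs leadsToDestination_memoized_dfs_alt
  have hgb : pvGraphB edges = pvGraphA edges := rfl
  rw [hgb]
  by_cases hguard : (pvGraphA edges).getD destination [] ≠ []
  · simp only [if_pos hguard]
  · simp only [if_neg hguard]
    obtain ⟨⟨r, m', v'⟩, hA⟩ := (pvDfsA_total (pvGraphA edges) destination (edges.length + 2)).1
      source PySem.Dict.empty PySem.Set.empty (by
        have h1 : pvMeasure (pvGraphA edges) PySem.Set.empty ≤ (pvGraphA edges).keys.length :=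
          List.length_filter_le _ _
        have h2 := pvGraph_keys_le edges
        omega)
    obtain ⟨color', k, hrel, hk, heq⟩ :=
      (pvSim (pvGraphA edges) destination edges.length (pvGraph_deg_le edges) (edges.length + 2)).1
        _ _ _ _ _ _ hA _ pvRel_empty
    have hkT : k ≤ (edges.length + 2) ^ (edges.length + 3) := by
      have hexp : (edges.length + 2) ^ (edges.length + 2 + 1) =
          (edges.length + 2) ^ (edges.length + 3) := rfl
      omega
    have hB : pvRunB (pvGraphA edges) destination
        ((edges.length + 2) ^ (edges.length + 3) + 1) [(source, 0)] PySem.Dict.empty true = some r := by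
      have hT : (edges.length + 2) ^ (edges.length + 3) + 1 =
          (((edges.length + 2) ^ (edges.length + 3) + 1 - k) + k) := by omega
      rw [hT, heq]
      obtain ⟨fb', hfb⟩ : ∃ fb', (edges.length + 2) ^ (edges.length + 3) + 1 - k = fb' + 1 :=
        ⟨(edges.length + 2) ^ (edges.length + 3) - k, by omega⟩
      rw [hfb]
      rfl
    rw [hA, hB]
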